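-- pv_equiv track=rewrite | github.com/hvpham-yorku/project-group-11-evalio | backend/app/services/strategy_service.py | _merge_unique_techniques
-- ===== SOURCE A (Python) =====
-- from typing import Any
--
-- _PRIORITY_RANK = {
--     "critical": 4,
--     "high": 3,
--     "medium": 2,
--     "low": 1,
-- }
--
-- def _priority_rank(priority: str) -> int:
--     return _PRIORITY_RANK.get(priority, 0)
--
-- def _merge_unique_techniques(techniques: list[dict[str, Any]]) -> list[dict[str, Any]]:
--     deduped: dict[str, dict[str, Any]] = {}
--     for technique in techniques:
--         key = technique["name"]
--         existing = deduped.get(key)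
--         if existing is None:
--             deduped[key] = technique
--             continue
--
--         existing_rank = _priority_rank(existing.get("priority", ""))
--         candidate_rank = _priority_rank(technique.get("priority", ""))
--         if candidate_rank > existing_rank:
--             deduped[key] = technique
--             continue
--         if candidate_rank == existing_rank and len(technique.get("reason", "")) > len(existing.get("reason", "")):
--             deduped[key] = technique
--
--     return sorted(
--         deduped.values(),
--         key=lambda technique: (
--             -_priority_rank(technique.get("priority", "")),
--             technique.get("name", ""),
--         ),
--     )
-- ===== SOURCE B (Python) =====
-- from typing import Any
--
-- _PRIORITY_RANK = {
--     "critical": 4,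
--     "high": 3,
--     "medium": 2,
--     "low": 1,
-- }
--
-- def _priority_rank(priority: str) -> int:
--     return _PRIORITY_RANK.get(priority, 0)
--
-- def _merge_unique_techniques(techniques: list[dict[str, Any]]) -> list[dict[str, Any]]:
--     groups: dict[str, list[dict[str, Any]]] = {}
--     for technique in techniques:
--         groups.setdefault(technique["name"], []).append(technique)
--     best = [
--         max(group, key=lambda t: (_priority_rank(t.get("priority", "")), len(t.get("reason", ""))))
--         for group in groups.values()
--     ]
--     return sorted(
--         best,
--         key=lambda technique: (
--             -_priority_rank(technique.get("priority", "")),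
--             technique.get("name", ""),
--         ),
--     )
-- ===== Notes on version B (the rewrite author's own statement) =====
-- stated objective: alternative
-- what changed: Replaces A's accumulate-and-compare dict loop (keep current best per name, replacing on a strictly-better candidate) by a group-by-name indexing pass followed by a per-group max with the (rank, reason-length) key, then the same final sort; Pre_ only excludes inputs where A raises KeyError (a technique without a "name" key).
import Mathlib
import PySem

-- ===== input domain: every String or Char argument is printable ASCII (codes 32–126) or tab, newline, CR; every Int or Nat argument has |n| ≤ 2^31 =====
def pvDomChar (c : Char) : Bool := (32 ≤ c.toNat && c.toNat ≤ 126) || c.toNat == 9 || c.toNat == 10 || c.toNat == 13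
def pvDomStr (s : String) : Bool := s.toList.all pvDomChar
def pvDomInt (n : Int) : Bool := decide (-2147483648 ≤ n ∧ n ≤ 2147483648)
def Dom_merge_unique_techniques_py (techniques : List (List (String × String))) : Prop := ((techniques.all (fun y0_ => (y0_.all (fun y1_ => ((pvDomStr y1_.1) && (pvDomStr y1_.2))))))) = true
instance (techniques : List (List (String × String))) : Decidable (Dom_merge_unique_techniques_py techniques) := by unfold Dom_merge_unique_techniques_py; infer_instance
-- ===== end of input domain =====

-- B replaces A's accumulate-and-compare dict loop by a group-by-name pass plus a per-group max
-- (objective: alternative decomposition, same asymptotic cost); equivalence is about the return value.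

-- ===== PORT A =====
-- shared module helper: _PRIORITY_RANK.get(priority, 0)
def pvRank (priority : String) : Int :=
  PySem.Dict.getD ⟨[("critical", 4), ("high", 3), ("medium", 2), ("low", 1)]⟩ priority 0

-- technique.get(k, dflt)
def pvGet (t : List (String × String)) (k dflt : String) : String :=
  PySem.Dict.getD ⟨t⟩ k dflt

-- technique["name"]; KeyError (get? = none) is excluded by Pre_, the "" default is never used there
def pvName (t : List (String × String)) : String :=
  (PySem.Dict.get? ⟨t⟩ "name").getD ""

-- the body of A's 'for technique in techniques' loop
def pvStepA (d : PySem.Dict String (List (String × String))) (t : List (String × String)) :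
    PySem.Dict String (List (String × String)) :=
  let key := pvName t
  match d.get? key with
  | none => d.insert key t
  | some existing =>
    let existing_rank := pvRank (pvGet existing "priority" "")
    let candidate_rank := pvRank (pvGet t "priority" "")
    if candidate_rank > existing_rank then d.insert key t
    else if candidate_rank == existing_rank
        && PySem.Str.len (pvGet t "reason" "") > PySem.Str.len (pvGet existing "reason" "") then
      d.insert key t
    else d

def merge_unique_techniques_py (techniques : List (List (String × String))) : List (List (String × String)) :=
  let deduped := techniques.foldl pvStepA PySem.Dict.empty
  PySem.List.sorted2 (PySem.Dict.values deduped)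
    (fun t => -(pvRank (pvGet t "priority" ""))) (fun t => pvGet t "name" "")

-- ===== PORT B =====
def merge_unique_techniques_py_alt (techniques : List (List (String × String))) : List (List (String × String)) :=
  let groups := techniques.foldl (fun d t => d.modify (pvName t) [] (fun g => g ++ [t])) PySem.Dict.empty
  -- max(group, key=...) ; every group is nonempty, so the .getD [] default of max2? is never used
  let best := (PySem.Dict.values groups).map (fun g =>
    (PySem.List.max2? g (fun t => pvRank (pvGet t "priority" ""))
      (fun t => PySem.Str.len (pvGet t "reason" ""))).getD [])
  PySem.List.sorted2 best
    (fun t => -(pvRank (pvGet t "priority" ""))) (fun t => pvGet t "name" "")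

-- ===== PRECONDITION & SPEC =====
-- A raises KeyError on any technique dict without a "name" key; Pre_ excludes exactly those inputs.
def Pre_merge_unique_techniques_py (techniques : List (List (String × String))) : Prop :=
  ∀ t ∈ techniques, (PySem.Dict.contains (⟨t⟩ : PySem.Dict String String) "name") = true
instance (techniques : List (List (String × String))) : Decidable (Pre_merge_unique_techniques_py techniques) := by
  unfold Pre_merge_unique_techniques_py; infer_instance

def pvWitness_merge_unique_techniques_py : (List (List (String × String))) :=
  [[("name", "a"), ("priority", "high")], [("name", "a"), ("reason", "rr")], [("name", "b")]]

def Spec_merge_unique_techniques_py (techniques : List (List (String × String))) (out : List (List (String × String))) : Prop := out = merge_unique_techniques_py_alt techniques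
instance (techniques : List (List (String × String))) (out : List (List (String × String))) : Decidable (Spec_merge_unique_techniques_py techniques out) := by unfold Spec_merge_unique_techniques_py; infer_instance

-- ===== CLAIM (what is proved, stated in full; the proofs are below) =====
def Claim_equal_merge_unique_techniques_py : Prop := ∀ (techniques : List (List (String × String))), Dom_merge_unique_techniques_py techniques → Pre_merge_unique_techniques_py techniques → Spec_merge_unique_techniques_py techniques (merge_unique_techniques_py techniques)

-- ===== LEMMAS AND PROOFS =====

-- the two sort keys / the comparison keys, abbreviated for the proofs
def pvK1 (t : List (String × String)) : Int := pvRank (pvGet t "priority" "")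
def pvK2 (t : List (String × String)) : Int := PySem.Str.len (pvGet t "reason" "")

-- the step of PySem.List.max2? with keys pvK1, pvK2
def pvMaxStep (acc : Option (List (String × String))) (x : List (String × String)) :
    Option (List (String × String)) :=
  match acc with
  | none => some x
  | some m => if (decide (pvK1 m < pvK1 x) || !decide (pvK1 x < pvK1 m) && decide (pvK2 m < pvK2 x))
      then some x else some m

theorem foldl_pvMaxStep (l : List (List (String × String))) :
    l.foldl pvMaxStep none
      = PySem.List.max2? l (fun t => pvRank (pvGet t "priority" "")) (fun t => PySem.Str.len (pvGet t "reason" "")) := by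
  show _ = List.foldl _ none l
  congr 1
  funext acc x
  cases acc <;> simp [pvMaxStep, pvK1, pvK2]

theorem get?_pvStepA (d : PySem.Dict String (List (String × String))) (t : List (String × String)) (n : String) :
    (pvStepA d t).get? n = if pvName t = n then pvMaxStep (d.get? n) t else d.get? n := by
  unfold pvStepA pvMaxStep
  by_cases hn : pvName t = n
  · subst hn
    rcases h : d.get? (pvName t) with _ | e
    · simp [h]
    · simp only [h, gt_iff_lt]
      split_ifs with h1 h2 <;>
        simp_all [pvK1, pvK2, PySem.Str.len]
      omega
  · rcases h : d.get? (pvName t) with _ | e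
    · simp [h, PySem.Dict.get?_insert, hn, Ne.symm hn]
    · simp only [h, gt_iff_lt, if_neg hn]
      split_ifs <;> simp [PySem.Dict.get?_insert, Ne.symm hn]

theorem get?_foldl_pvStepA (ts : List (List (String × String))) (d : PySem.Dict String (List (String × String))) (n : String) :
    (ts.foldl pvStepA d).get? n
      = (ts.filter (fun t => pvName t == n)).foldl pvMaxStep (d.get? n) := by
  induction ts generalizing d with
  | nil => rfl
  | cons t ts ih =>
    by_cases hn : pvName t = n
    · simp [hn, ih, get?_pvStepA]
    · simp [hn, ih, get?_pvStepA]

theorem keys_pvStepA (d : PySem.Dict String (List (String × String))) (t : List (String × String)) :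
    (pvStepA d t).keys = PySem.Set.add d.keys (pvName t) := by
  have hc : d.contains (pvName t) = (d.get? (pvName t)).isSome := PySem.Dict.contains_eq_isSome_get? d _
  have hk : PySem.Set.contains d.keys (pvName t) = d.contains (pvName t) := by
    simp [PySem.Dict.contains_eq_decide_mem_keys, PySem.Set.contains]
  unfold pvStepA
  rcases h : d.get? (pvName t) with _ | e
  · rw [h] at hc
    simp only [h, PySem.Set.add, hk, hc, Option.isSome_none, Bool.false_eq_true, if_false]
    exact PySem.Dict.keys_insert_of_not_contains d t hc
  · rw [h] at hc
    simp only [h, PySem.Set.add, hk, hc, Option.isSome_some, if_true]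
    split_ifs <;> first | exact PySem.Dict.keys_insert_of_contains d t hc | rfl

theorem keys_foldl_pvStepA (ts : List (List (String × String))) (d : PySem.Dict String (List (String × String))) :
    (ts.foldl pvStepA d).keys = PySem.Set.update d.keys (ts.map pvName) := by
  induction ts generalizing d with
  | nil => rfl
  | cons t ts ih => simp [PySem.Set.update, List.foldl_cons, ih, keys_pvStepA]

-- ===== VERDICT (by name: the statement is the Claim_ definition above) =====
theorem groupsD (ts : List (List (String × String))) (n : String) :
    (ts.foldl (fun d t => d.modify (pvName t) [] (fun g => g ++ [t])) PySem.Dict.empty).getD n []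
      = ts.filter (fun t => pvName t == n) := by
  have hm : ts.foldl (fun d t => d.modify (pvName t) [] (fun g => g ++ [t])) PySem.Dict.empty
      = (ts.map (fun t => (pvName t, t))).foldl
          (fun d p => d.modify p.1 [] (fun g => g ++ [p.2])) PySem.Dict.empty := by
    rw [List.foldl_map]
  rw [hm, PySem.Dict.getD_foldl_modify_append]
  simp [List.filter_map, Function.comp_def]

theorem merge_unique_techniques_py_spec : Claim_equal_merge_unique_techniques_py := by
  intro ts _ _
  unfold Spec_merge_unique_techniques_py merge_unique_techniques_py merge_unique_techniques_py_alt
  dsimp only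
  congr 1
  -- A's deduped.values() equals B's per-group max list, element for element
  have hkA : (ts.foldl pvStepA PySem.Dict.empty).keys = PySem.Set.ofList (ts.map pvName) := by
    rw [keys_foldl_pvStepA, PySem.Dict.keys_empty, PySem.Set.update_nil_left]
  have hkB : (ts.foldl (fun d t => d.modify (pvName t) [] (fun g => g ++ [t])) PySem.Dict.empty).keys
      = PySem.Set.ofList (ts.map pvName) := by
    rw [PySem.Dict.keys_foldl_modify_key ts pvName [] (fun _ t => fun g => g ++ [t]),
      PySem.Dict.keys_empty, PySem.Set.update_nil_left]
  rw [PySem.Dict.values_eq_map_keys _ (by rw [hkA]; exact PySem.Set.nodup_ofList _) [],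
    PySem.Dict.values_eq_map_keys _ (by rw [hkB]; exact PySem.Set.nodup_ofList _) [],
    hkA, hkB, List.map_map]
  refine List.map_congr_left (fun n _ => ?_)
  show (ts.foldl pvStepA PySem.Dict.empty).getD n [] = _
  rw [PySem.Dict.getD, get?_foldl_pvStepA, PySem.Dict.get?_empty, foldl_pvMaxStep]
  simp [groupsD]
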